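-- pv_equiv track=rewrite | github.com/Zabolekar/budivelnyk | src/budivelnyk/__init__.py | bf_to_intermediate
-- ===== SOURCE A (Python) =====
-- def bf_to_intermediate(bf_code: str) -> list[str]:
--     """
--     Currently all it does is grouping consecutive identical
--     + - < > , . commands together and stripping comments.
--     """
--
--     result: list[str] = []
--
--     group = False
--     allowed = "+-><[].,"
--     groupable = "+-><.,"
--
--     for command in bf_code:
--         if command not in allowed:
--             continue
--         if command in groupable:
--             if len(result) > 0:
--                 if result[-1].endswith(command):
--                     result[-1] += command
--                     continue
--         result.append(command)
--
--     return result
-- ===== SOURCE B (Python) =====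
-- def bf_to_intermediate(bf_code: str) -> list[str]:
--     """
--     Filter out comments first, then run-length group the remaining
--     commands with an index scan; brackets stay single-character.
--     """
--     cmds = [c for c in bf_code if c in "+-><[].,"]
--     result: list[str] = []
--     i = 0
--     n = len(cmds)
--     while i < n:
--         c = cmds[i]
--         if c in "+-><.,":
--             j = i
--             while j < n and cmds[j] == c:
--                 j += 1
--             result.append(c * (j - i))
--             i = j
--         else:
--             result.append(c)
--             i += 1
--     return result
-- ===== Notes on version B (the rewrite author's own statement) =====
-- stated objective: alternative
-- what changed: Replaces A's single-pass incremental accumulator (append-or-extend-last via endswith on result[-1]) with a filter pass that strips comments followed by an index-based run-length scan that emits each group at once.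
import Mathlib
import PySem

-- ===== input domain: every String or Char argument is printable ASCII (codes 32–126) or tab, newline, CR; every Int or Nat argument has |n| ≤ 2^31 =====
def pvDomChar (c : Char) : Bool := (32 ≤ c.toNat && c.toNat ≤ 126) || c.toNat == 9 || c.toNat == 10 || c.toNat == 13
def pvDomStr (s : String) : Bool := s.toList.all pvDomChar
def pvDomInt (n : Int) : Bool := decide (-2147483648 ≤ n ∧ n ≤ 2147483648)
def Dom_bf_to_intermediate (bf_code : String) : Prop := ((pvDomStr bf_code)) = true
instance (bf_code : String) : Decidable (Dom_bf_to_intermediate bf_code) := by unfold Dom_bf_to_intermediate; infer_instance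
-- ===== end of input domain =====

-- B replaces A's incremental append-or-extend-last accumulator with a comment-stripping
-- filter pass followed by a run-length grouping scan (objective: alternative decomposition).

-- ===== PORT A =====
-- A's loop body: skip non-commands; a groupable command extends result[-1] when it
-- ends with that command, otherwise (and for brackets always) it is appended alone.
def bfStep (result : List String) (command : Char) : List String :=
  if command ∉ "+-><[].,".toList then result
  else if command ∈ "+-><.,".toList ∧ result.length > 0 ∧
          PySem.Chars.endswith (result.getLastD "").toList [command] = true then
    result.dropLast ++ [String.ofList ((result.getLastD "").toList ++ [command])]
  else
    result ++ [String.ofList [command]]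

def bf_to_intermediate (bf_code : String) : List String :=
  bf_code.toList.foldl bfStep []

-- ===== PORT B =====
-- B's scan: a groupable command absorbs its whole run, a bracket is emitted alone.
def bfGroup : List Char → List String
  | [] => []
  | c :: rest =>
    if c ∈ "+-><.,".toList then
      String.ofList (c :: rest.takeWhile (· == c)) :: bfGroup (rest.dropWhile (· == c))
    else
      String.ofList [c] :: bfGroup rest
termination_by l => l.length
decreasing_by
  · simpa using Nat.lt_succ_of_le (List.length_dropWhile_le _ _)
  · simp

def bf_to_intermediate_alt (bf_code : String) : List String :=
  bfGroup (bf_code.toList.filter (· ∈ "+-><[].,".toList))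

-- ===== PRECONDITION & SPEC =====
def Spec_bf_to_intermediate (bf_code : String) (out : List String) : Prop := out = bf_to_intermediate_alt bf_code
instance (bf_code : String) (out : List String) : Decidable (Spec_bf_to_intermediate bf_code out) := by unfold Spec_bf_to_intermediate; infer_instance

-- ===== CLAIM (what is proved, stated in full; the proofs are below) =====
def Claim_equal_bf_to_intermediate : Prop := ∀ (bf_code : String), Dom_bf_to_intermediate bf_code → Spec_bf_to_intermediate bf_code (bf_to_intermediate bf_code)

-- ===== LEMMAS AND PROOFS =====

-- the three shapes of A's step
theorem bfStep_skip (acc : List String) (c : Char) (h : c ∉ "+-><[].,".toList) :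
    bfStep acc c = acc := by
  unfold bfStep; rw [if_pos h]

theorem bfStep_append (acc : List String) (c : Char) (hcall : c ∈ "+-><[].,".toList)
    (h : ¬ (c ∈ "+-><.,".toList ∧ acc.length > 0 ∧
        PySem.Chars.endswith (acc.getLastD "").toList [c] = true)) :
    bfStep acc c = acc ++ [String.ofList [c]] := by
  unfold bfStep; rw [if_neg (not_not_intro hcall), if_neg h]

theorem bfStep_extend (acc : List String) (c : Char) (hcall : c ∈ "+-><[].,".toList)
    (h : c ∈ "+-><.,".toList ∧ acc.length > 0 ∧
        PySem.Chars.endswith (acc.getLastD "").toList [c] = true) :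
    bfStep acc c = acc.dropLast ++ [String.ofList ((acc.getLastD "").toList ++ [c])] := by
  unfold bfStep; rw [if_neg (not_not_intro hcall), if_pos h]

-- A's step ignores characters outside the command alphabet, so folding over the
-- whole string equals folding over its filtered command list.
theorem foldl_bfStep_filter (l : List Char) (acc : List String) :
    l.foldl bfStep acc = (l.filter (· ∈ "+-><[].,".toList)).foldl bfStep acc := by
  induction l generalizing acc with
  | nil => rfl
  | cons c rest ih =>
    by_cases hc : c ∈ "+-><[].,".toList
    · rw [List.foldl_cons, List.filter_cons_of_pos (by simpa using hc), List.foldl_cons, ih]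
    · rw [List.foldl_cons, bfStep_skip acc c hc,
          List.filter_cons_of_neg (by simpa using hc), ih]

-- the endswith test on a single character is a last-element test
theorem endswith_singleton (s : List Char) (c : Char) :
    PySem.Chars.endswith s [c] = true ↔ s.getLast? = some c := by
  rw [PySem.Chars.endswith_iff]
  constructor
  · rintro ⟨t, rfl⟩; simp
  · intro h
    obtain ⟨t, rfl⟩ := List.getLast?_eq_some_iff.mp h
    exact ⟨t, rfl⟩

-- the last element of a nonempty constant-headed run
theorem getLast?_const_run (c : Char) : ∀ l : List Char, (∀ x ∈ l, x = c) →
    (c :: l).getLast? = some c := by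
  intro l
  induction l with
  | nil => simp
  | cons x xs ih =>
    intro h
    have hx := h x (List.mem_cons_self)
    subst hx
    rw [List.getLast?_cons_cons]
    exact ih (fun y hy => h y (List.mem_cons_of_mem _ hy))

-- a groupable command is a command
theorem groupable_allowed (c : Char) (h : c ∈ "+-><.,".toList) :
    c ∈ "+-><[].,".toList := by
  rcases (by simpa using h : c = '+' ∨ c = '-' ∨ c = '>' ∨ c = '<' ∨ c = '.' ∨ c = ',') with
    h | h | h | h | h | h <;> subst h <;> decide

-- Folding A's step over a run of a single groupable command c, starting from an
-- accumulator whose last element ends in c, extends that last element by the run.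
theorem foldl_bfStep_run (run : List Char) (c : Char)
    (hc : c ∈ "+-><.,".toList) (hrun : ∀ x ∈ run, x = c) :
    ∀ (pre : List String) (s : List Char), s.getLast? = some c →
      List.foldl bfStep (pre ++ [String.ofList s]) run = pre ++ [String.ofList (s ++ run)] := by
  induction run with
  | nil => intro pre s _; simp
  | cons x rest ih =>
    intro pre s hs
    have hx : x = c := hrun x (List.mem_cons_self)
    subst hx
    have hstep : bfStep (pre ++ [String.ofList s]) x
        = pre ++ [String.ofList (s ++ [x])] := by
      rw [bfStep_extend _ _ (groupable_allowed x hc)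
            ⟨hc, by simp, by rw [endswith_singleton]; simpa using hs⟩]
      simp
    rw [List.foldl_cons, hstep,
        ih (fun y hy => hrun y (List.mem_cons_of_mem _ hy)) pre (s ++ [x]) (by simp)]
    simp

-- Main invariant: over an all-command list whose head (if groupable) cannot
-- extend the accumulator's last element, A's fold appends B's grouping.
theorem foldl_bfStep_eq_bfGroup (l : List Char)
    (hall : ∀ c ∈ l, c ∈ "+-><[].,".toList) :
    ∀ (acc : List String),
      (∀ c, l.head? = some c → c ∈ "+-><.,".toList →
          ¬ (acc.length > 0 ∧ PySem.Chars.endswith (acc.getLastD "").toList [c] = true)) →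
      l.foldl bfStep acc = acc ++ bfGroup l := by
  induction l using bfGroup.induct with
  | case1 => intro acc _; simp [bfGroup]
  | case2 c rest hg ih =>
    intro acc hfresh
    have hcall : c ∈ "+-><[].,".toList := hall c (List.mem_cons_self)
    have hstep : bfStep acc c = acc ++ [String.ofList [c]] :=
      bfStep_append acc c hcall (fun h => hfresh c rfl hg ⟨h.2.1, h.2.2⟩)
    have htake : ∀ x ∈ rest.takeWhile (· == c), x = c := by
      intro x hx
      simpa using List.mem_takeWhile_imp hx
    have hrestall : ∀ d ∈ rest.dropWhile (· == c), d ∈ "+-><[].,".toList :=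
      fun d hd => hall d (List.mem_cons_of_mem _ ((List.dropWhile_sublist _).mem hd))
    calc (c :: rest).foldl bfStep acc
        = rest.foldl bfStep (acc ++ [String.ofList [c]]) := by
          rw [List.foldl_cons, hstep]
      _ = (rest.takeWhile (· == c) ++ rest.dropWhile (· == c)).foldl bfStep
            (acc ++ [String.ofList [c]]) := by
          rw [List.takeWhile_append_dropWhile]
      _ = (rest.dropWhile (· == c)).foldl bfStep
            (acc ++ [String.ofList ([c] ++ rest.takeWhile (· == c))]) := by
          rw [List.foldl_append, foldl_bfStep_run _ c hg htake acc [c] (by simp)]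
      _ = acc ++ bfGroup (c :: rest) := by
          rw [ih hrestall]
          · rw [bfGroup]
            rw [if_pos hg]
            simp
          · intro d hd _
            have hdne : (d == c) = false := by
              have := List.head?_dropWhile_not (· == c) rest
              rw [hd] at this
              simpa using this
            rintro ⟨-, hend⟩
            rw [endswith_singleton] at hend
            have hlast : ([c] ++ rest.takeWhile (· == c)).getLast? = some c :=
              getLast?_const_run c _ htake
            simp only [List.getLastD_concat, String.toList_ofList] at hend
            rw [hlast] at hend
            simp at hend
            simp [hend] at hdne
  | case3 c rest hg ih =>
    intro acc hfresh
    have hcall : c ∈ "+-><[].,".toList := hall c (List.mem_cons_self)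
    have hstep : bfStep acc c = acc ++ [String.ofList [c]] :=
      bfStep_append acc c hcall (fun h => hg h.1)
    rw [List.foldl_cons, hstep,
        ih (fun d hd => hall d (List.mem_cons_of_mem _ hd))]
    · rw [bfGroup]
      rw [if_neg hg]
      simp
    · intro d hd hdg
      rintro ⟨-, hend⟩
      rw [endswith_singleton] at hend
      simp only [List.getLastD_concat, String.toList_ofList] at hend
      simp at hend
      -- c is a bracket (allowed but not groupable), d groupable, so d ≠ c
      have hc2 : c = '[' ∨ c = ']' := by
        rcases (by simpa using hcall :
            c = '+' ∨ c = '-' ∨ c = '>' ∨ c = '<' ∨ c = '[' ∨ c = ']' ∨ c = '.' ∨ c = ',') with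
          h | h | h | h | h | h | h | h <;> subst h <;>
          first
            | (exact absurd (by decide) hg)
            | (exact Or.inl rfl)
            | (exact Or.inr rfl)
      rcases (by simpa using hdg :
          d = '+' ∨ d = '-' ∨ d = '>' ∨ d = '<' ∨ d = '.' ∨ d = ',') with
        h | h | h | h | h | h <;> rcases hc2 with h2 | h2 <;> subst h <;> subst h2 <;>
        simp at hend

-- ===== VERDICT (by name: the statement is the Claim_ definition above) =====
theorem bf_to_intermediate_spec : Claim_equal_bf_to_intermediate := by
  intro bf_code _
  unfold Spec_bf_to_intermediate bf_to_intermediate bf_to_intermediate_alt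
  rw [foldl_bfStep_filter]
  have h := foldl_bfStep_eq_bfGroup (bf_code.toList.filter (· ∈ "+-><[].,".toList))
    (fun c hc => by simpa using (List.mem_filter.mp hc).2) []
    (by intro c _ _; simp)
  simpa using h
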